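-- pv_equiv track=rewrite | github.com/efirvida/fem-shell | src/fem_shell/models/blade/numad/io/excel_to_blade.py | _extent_from_regions
-- ===== SOURCE A (Python) =====
-- _REGION_HP_INDICES = {
--     "TE_FLAT":  (0, 1),  "TE_REINF": (1, 2),  "TE_PANEL": (2, 3),
--     "SPAR":     (3, 4),  "LE_PANEL": (4, 5),  "LE":       (5, 6),
-- }
--
-- _REGION_LP_INDICES = {
--     "LE":       (0, 1),  "LE_PANEL": (1, 2),  "SPAR":     (2, 3),
--     "TE_PANEL": (3, 4),  "TE_REINF": (4, 5),  "TE_FLAT":  (5, 6),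
-- }
--
-- _HP_INDEX_TO_LABEL = {0: "te", 1: "e", 2: "d", 3: "c", 4: "b", 5: "a", 6: "le"}
--
-- _LP_INDEX_TO_LABEL = {0: "le", 1: "a", 2: "b", 3: "c", 4: "d", 5: "e", 6: "te"}
--
-- def _extent_from_regions(regions, side: str):
--     """Compute keypoint extent labels for a contiguous set of region types.
--
--     Returns a two-element list ``['label1', 'label2']`` or an empty list.
--     """
--     idx_map = _REGION_HP_INDICES if side == "hp" else _REGION_LP_INDICES
--     label_map = _HP_INDEX_TO_LABEL if side == "hp" else _LP_INDEX_TO_LABEL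
--
--     all_indices = set()
--     for r in regions:
--         if r in idx_map:
--             all_indices.update(idx_map[r])
--     if not all_indices:
--         return []
--     return [label_map[min(all_indices)], label_map[max(all_indices)]]
-- ===== SOURCE B (Python) =====
-- _REGION_HP_INDICES = {
--     "TE_FLAT":  (0, 1),  "TE_REINF": (1, 2),  "TE_PANEL": (2, 3),
--     "SPAR":     (3, 4),  "LE_PANEL": (4, 5),  "LE":       (5, 6),
-- }
--
-- _REGION_LP_INDICES = {
--     "LE":       (0, 1),  "LE_PANEL": (1, 2),  "SPAR":     (2, 3),
--     "TE_PANEL": (3, 4),  "TE_REINF": (4, 5),  "TE_FLAT":  (5, 6),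
-- }
--
-- _HP_INDEX_TO_LABEL = {0: "te", 1: "e", 2: "d", 3: "c", 4: "b", 5: "a", 6: "le"}
--
-- _LP_INDEX_TO_LABEL = {0: "le", 1: "a", 2: "b", 3: "c", 4: "d", 5: "e", 6: "te"}
--
-- # Region names in index order per side, and the labels indexed 0..6.
-- _HP_ORDER = ["TE_FLAT", "TE_REINF", "TE_PANEL", "SPAR", "LE_PANEL", "LE"]
-- _LP_ORDER = ["LE", "LE_PANEL", "SPAR", "TE_PANEL", "TE_REINF", "TE_FLAT"]
-- _HP_LABELS = ["te", "e", "d", "c", "b", "a", "le"]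
-- _LP_LABELS = ["le", "a", "b", "c", "d", "e", "te"]
--
--
-- def _extent_from_regions(regions, side: str):
--     """Scan the FIXED ordered key list of the side, not the input: because the
--     side's index pairs are exactly (i, i+1) for the i-th key in index order,
--     the extent is [label of first key present, label of (last key present)+1]."""
--     order = _HP_ORDER if side == "hp" else _LP_ORDER
--     labels = _HP_LABELS if side == "hp" else _LP_LABELS
--     present = set(regions)
--     hit = [i for i, name in enumerate(order) if name in present]
--     if not hit:
--         return []
--     return [labels[hit[0]], labels[hit[-1] + 1]]
-- ===== Notes on version B (the rewrite author's own statement) =====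
-- stated objective: alternative
-- what changed: B scans the side's FIXED six-key region list in index order, testing each key for membership in a set built from the input, and reads the extent off the positions of the first and last key present (labels[first], labels[last+1]); A instead scans the input regions accumulating a set of endpoint indices and takes its min/max.
import Mathlib
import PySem

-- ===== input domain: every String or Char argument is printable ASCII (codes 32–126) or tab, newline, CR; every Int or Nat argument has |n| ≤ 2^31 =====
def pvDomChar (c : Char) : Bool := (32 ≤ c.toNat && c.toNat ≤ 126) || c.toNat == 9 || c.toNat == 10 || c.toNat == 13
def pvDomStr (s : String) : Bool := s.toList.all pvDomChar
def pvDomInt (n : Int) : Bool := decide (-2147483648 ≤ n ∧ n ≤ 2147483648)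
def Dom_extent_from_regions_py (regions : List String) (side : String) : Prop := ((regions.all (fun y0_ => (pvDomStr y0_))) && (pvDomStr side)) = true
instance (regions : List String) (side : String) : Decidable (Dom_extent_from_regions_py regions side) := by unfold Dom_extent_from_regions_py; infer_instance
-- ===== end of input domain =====

-- B scans the side's fixed six-key order list against a set of the input regions instead of
-- scanning the input accumulating an endpoint-index set (objective: alternative decomposition).

-- ===== PORT A =====
-- the module dicts, as lookup functions (String keys / small-Int keys; exact)
def hpIdx : String → Option (Int × Int)
  | "TE_FLAT" => some (0, 1) | "TE_REINF" => some (1, 2) | "TE_PANEL" => some (2, 3)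
  | "SPAR" => some (3, 4) | "LE_PANEL" => some (4, 5) | "LE" => some (5, 6)
  | _ => none

def lpIdx : String → Option (Int × Int)
  | "LE" => some (0, 1) | "LE_PANEL" => some (1, 2) | "SPAR" => some (2, 3)
  | "TE_PANEL" => some (3, 4) | "TE_REINF" => some (4, 5) | "TE_FLAT" => some (5, 6)
  | _ => none

-- label dicts; default "" is never reached: every index ever looked up is 0..6
def hpLabel : Int → String
  | 0 => "te" | 1 => "e" | 2 => "d" | 3 => "c" | 4 => "b" | 5 => "a" | 6 => "le"
  | _ => ""

def lpLabel : Int → String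
  | 0 => "le" | 1 => "a" | 2 => "b" | 3 => "c" | 4 => "d" | 5 => "e" | 6 => "te"
  | _ => ""

-- loop body of A: 'if r in idx_map: all_indices.update(idx_map[r])'
def stepA (f : String → Option (Int × Int)) (s : PySem.Set Int) (r : String) : PySem.Set Int :=
  match f r with
  | some (i, j) => PySem.Set.update s [i, j]
  | none => s

def extent_from_regions_py (regions : List String) (side : String) : List String :=
  let idxMap := if side == "hp" then hpIdx else lpIdx
  let labelMap := if side == "hp" then hpLabel else lpLabel
  let allIndices : PySem.Set Int := regions.foldl (stepA idxMap) PySem.Set.empty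
  if allIndices.isEmpty then []
  else
    -- min/max over a nonempty set (order-insensitive); .getD 0 is never the default here
    [labelMap ((PySem.List.min? allIndices (fun x => x)).getD 0),
     labelMap ((PySem.List.max? allIndices (fun x => x)).getD 0)]

-- ===== PORT B =====
-- the module-level key-order and label lists of Source B
def hpOrder : List String := ["TE_FLAT", "TE_REINF", "TE_PANEL", "SPAR", "LE_PANEL", "LE"]
def lpOrder : List String := ["LE", "LE_PANEL", "SPAR", "TE_PANEL", "TE_REINF", "TE_FLAT"]
def hpLabels : List String := ["te", "e", "d", "c", "b", "a", "le"]
def lpLabels : List String := ["le", "a", "b", "c", "d", "e", "te"]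

def extent_from_regions_py_alt (regions : List String) (side : String) : List String :=
  let order := if side == "hp" then hpOrder else lpOrder
  let labels := if side == "hp" then hpLabels else lpLabels
  let present : PySem.Set String := PySem.Set.ofList regions
  -- hit = [i for i, name in enumerate(order) if name in present]
  let hit : List Int :=
    ((PySem.List.enumerate order).filter (fun p => PySem.Set.contains present p.2)).map (·.1)
  if hit.isEmpty then []
  else
    -- [labels[hit[0]], labels[hit[-1] + 1]]  (indices provably in 0..6, default "" unreached)
    [PySem.List.pyGetD labels (PySem.List.pyGetD hit 0 0) "",
     PySem.List.pyGetD labels (PySem.List.pyGetD hit (-1) 0 + 1) ""]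

-- ===== PRECONDITION & SPEC =====
def Spec_extent_from_regions_py (regions : List String) (side : String) (out : List String) : Prop := out = extent_from_regions_py_alt regions side
instance (regions : List String) (side : String) (out : List String) : Decidable (Spec_extent_from_regions_py regions side out) := by unfold Spec_extent_from_regions_py; infer_instance

-- ===== CLAIM (what is proved, stated in full; the proofs are below) =====
def Claim_equal_extent_from_regions_py : Prop := ∀ (regions : List String) (side : String), Dom_extent_from_regions_py regions side → Spec_extent_from_regions_py regions side (extent_from_regions_py regions side)

-- ===== LEMMAS AND PROOFS =====

-- proof-only helper: the running-(lo,hi) fold A's set computation is first reduced to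
def stepLH (f : String → Option (Int × Int)) (p : Option Int × Option Int) (r : String) :
    Option Int × Option Int :=
  match f r with
  | some (i, j) =>
      (some (match p.1 with | none => i | some l => min l i),
       some (match p.2 with | none => j | some h => max h j))
  | none => p

-- min? of a set after .add x, as an option-level fold step
theorem min?_add (s : List Int) (x : Int) :
    PySem.List.min? (PySem.Set.add s x) (fun y => y)
      = some (match PySem.List.min? s (fun y => y) with | none => x | some m => min m x) := by
  by_cases hx : x ∈ s
  · have hadd : PySem.Set.add s x = s := by simp [PySem.Set.add, PySem.Set.contains, hx]
    rw [hadd]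
    obtain ⟨a, t, rfl⟩ : ∃ a t, s = a :: t := by
      cases s with
      | nil => simp at hx
      | cons a t => exact ⟨a, t, rfl⟩
    have h := PySem.List.min?_isMin (xs := a :: t) (key := fun y => y)
      (m := (t.foldl min a)) (PySem.List.min?_id_cons ..) x hx
    rw [PySem.List.min?_id_cons]
    exact congrArg some (min_eq_left h).symm
  · have hadd : PySem.Set.add s x = s ++ [x] := by
      simp [PySem.Set.add, PySem.Set.contains, hx]
    rw [hadd]
    cases s with
    | nil =>
      rw [List.nil_append, PySem.List.min?_id_cons]
      rfl
    | cons a t =>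
      rw [List.cons_append, PySem.List.min?_id_cons, PySem.List.min?_id_cons, List.foldl_append]
      simp

theorem max?_add (s : List Int) (x : Int) :
    PySem.List.max? (PySem.Set.add s x) (fun y => y)
      = some (match PySem.List.max? s (fun y => y) with | none => x | some m => max m x) := by
  by_cases hx : x ∈ s
  · have hadd : PySem.Set.add s x = s := by simp [PySem.Set.add, PySem.Set.contains, hx]
    rw [hadd]
    obtain ⟨a, t, rfl⟩ : ∃ a t, s = a :: t := by
      cases s with
      | nil => simp at hx
      | cons a t => exact ⟨a, t, rfl⟩
    have h := PySem.List.max?_isMax (xs := a :: t) (key := fun y => y)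
      (m := (t.foldl max a)) (PySem.List.max?_id_cons ..) x hx
    rw [PySem.List.max?_id_cons]
    exact congrArg some (max_eq_left h).symm
  · have hadd : PySem.Set.add s x = s ++ [x] := by
      simp [PySem.Set.add, PySem.Set.contains, hx]
    rw [hadd]
    cases s with
    | nil =>
      rw [List.nil_append, PySem.List.max?_id_cons]
      rfl
    | cons a t =>
      rw [List.cons_append, PySem.List.max?_id_cons, PySem.List.max?_id_cons, List.foldl_append]
      simp

-- one step: the lo/hi accumulators track exactly (min?, max?) of A's set
theorem step_agree (f : String → Option (Int × Int))
    (hf : ∀ r i j, f r = some (i, j) → j = i + 1) (s : List Int) (r : String) :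
    stepLH f (PySem.List.min? s (fun y => y), PySem.List.max? s (fun y => y)) r
      = (PySem.List.min? (stepA f s r) (fun y => y),
         PySem.List.max? (stepA f s r) (fun y => y)) := by
  unfold stepA stepLH
  cases hfr : f r with
  | none => rfl
  | some p =>
    obtain ⟨i, j⟩ := p
    have hij : j = i + 1 := hf r i j hfr
    subst hij
    show _ = (PySem.List.min? (PySem.Set.add (PySem.Set.add s i) (i + 1)) _,
              PySem.List.max? (PySem.Set.add (PySem.Set.add s i) (i + 1)) _)
    rw [min?_add, min?_add, max?_add, max?_add]
    cases hm : PySem.List.min? s (fun y => y) with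
    | none =>
      have hM : PySem.List.max? s (fun y => y) = none := by
        rw [PySem.List.max?_eq_none_iff]
        rwa [PySem.List.min?_eq_none_iff] at hm
      simp only [hM]
      simp only [Prod.mk.injEq, Option.some.injEq]
      exact ⟨(min_eq_left (show (i:Int) ≤ i + 1 by omega)).symm, (max_eq_right (show (i:Int) ≤ i + 1 by omega)).symm⟩
    | some m =>
      have hs : s ≠ [] := by
        intro h; rw [h] at hm; simp [PySem.List.min?] at hm
      obtain ⟨M, hM⟩ : ∃ M, PySem.List.max? s (fun y => y) = some M := by
        cases hMx : PySem.List.max? s (fun y => y) with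
        | none => exact absurd ((PySem.List.max?_eq_none_iff _ _).mp hMx) hs
        | some M => exact ⟨M, rfl⟩
      simp only [hM]
      simp only [Prod.mk.injEq, Option.some.injEq]
      refine ⟨(min_eq_left (le_trans (min_le_right m i) (show (i:Int) ≤ i + 1 by omega))).symm, ?_⟩
      rw [max_assoc, max_eq_right (show (i:Int) ≤ i + 1 by omega)]

-- whole loop: fold of the lo/hi accumulators from (none, none) = (min?, max?) of A's fold from ∅
theorem fold_agree (f : String → Option (Int × Int))
    (hf : ∀ r i j, f r = some (i, j) → j = i + 1) :
    ∀ (rs : List String) (s : List Int),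
      rs.foldl (stepLH f) (PySem.List.min? s (fun y => y), PySem.List.max? s (fun y => y))
        = (PySem.List.min? (rs.foldl (stepA f) s) (fun y => y),
           PySem.List.max? (rs.foldl (stepA f) s) (fun y => y)) := by
  intro rs
  induction rs with
  | nil => intro s; rfl
  | cons r rs ih =>
    intro s
    simp only [List.foldl_cons, step_agree f hf s r]
    exact ih (stepA f s r)

-- A's body reduced to the lo/hi fold
theorem coreA (f : String → Option (Int × Int)) (g : Int → String)
    (hf : ∀ r i j, f r = some (i, j) → j = i + 1) (rs : List String) :
    (let s : PySem.Set Int := rs.foldl (stepA f) PySem.Set.empty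
     if s.isEmpty then []
     else [g ((PySem.List.min? s (fun x => x)).getD 0), g ((PySem.List.max? s (fun x => x)).getD 0)])
    = (match rs.foldl (stepLH f) (none, none) with
       | (some l, some h) => [g l, g h]
       | _ => []) := by
  have h := fold_agree f hf rs []
  have hstart : (PySem.List.min? ([] : List Int) (fun y => y),
                 PySem.List.max? ([] : List Int) (fun y => y))
      = ((none : Option Int), (none : Option Int)) := rfl
  rw [hstart] at h
  rw [h]
  simp only [PySem.Set.empty]
  cases hs : (rs.foldl (stepA f) ([] : List Int)) with
  | nil => simp [PySem.List.min?, PySem.List.max?]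
  | cons a t =>
    simp [List.isEmpty, PySem.List.min?_id_cons, PySem.List.max?_id_cons]

-- option-level running min/max steps and the lo/hi fold split over filterMap
def mstep (o : Option Int) (x : Int) : Option Int :=
  some (match o with | none => x | some m => min m x)

def Mstep (o : Option Int) (x : Int) : Option Int :=
  some (match o with | none => x | some m => max m x)

theorem LH_split (f : String → Option (Int × Int)) :
    ∀ (rs : List String) (p : Option Int × Option Int),
      rs.foldl (stepLH f) p
        = ((rs.filterMap (fun r => (f r).map (·.1))).foldl mstep p.1,
           (rs.filterMap (fun r => (f r).map (·.2))).foldl Mstep p.2) := by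
  intro rs
  induction rs with
  | nil => intro p; rfl
  | cons r rs ih =>
    intro p
    cases hfr : f r with
    | none =>
      simp only [List.foldl_cons, List.filterMap_cons, hfr, Option.map_none]
      rw [show stepLH f p r = p by unfold stepLH; rw [hfr]]
      exact ih p
    | some q =>
      obtain ⟨i, j⟩ := q
      simp only [List.foldl_cons, List.filterMap_cons, hfr, Option.map_some]
      rw [show stepLH f p r = (mstep p.1 i, Mstep p.2 j) by
        unfold stepLH mstep Mstep; rw [hfr]]
      exact ih (mstep p.1 i, Mstep p.2 j)

theorem foldl_mstep_some : ∀ (xs : List Int) (a : Int),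
    xs.foldl mstep (some a) = some (xs.foldl min a) := by
  intro xs
  induction xs with
  | nil => intro a; rfl
  | cons x xs ih => intro a; exact ih (min a x)

theorem foldl_Mstep_some : ∀ (xs : List Int) (a : Int),
    xs.foldl Mstep (some a) = some (xs.foldl max a) := by
  intro xs
  induction xs with
  | nil => intro a; rfl
  | cons x xs ih => intro a; exact ih (max a x)

theorem foldl_min_mem : ∀ (xs : List Int) (a : Int), xs.foldl min a ∈ a :: xs := by
  intro xs
  induction xs with
  | nil => intro a; simp
  | cons x xs ih =>
    intro a
    have h := ih (min a x)
    rcases min_choice a x with hc | hc <;>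
      (simp only [List.foldl_cons]; rw [hc] at h ⊢) <;>
      rcases List.mem_cons.mp h with h' | h' <;> simp [h']

theorem foldl_max_mem : ∀ (xs : List Int) (a : Int), xs.foldl max a ∈ a :: xs := by
  intro xs
  induction xs with
  | nil => intro a; simp
  | cons x xs ih =>
    intro a
    have h := ih (max a x)
    rcases max_choice a x with hc | hc <;>
      (simp only [List.foldl_cons]; rw [hc] at h ⊢) <;>
      rcases List.mem_cons.mp h with h' | h' <;> simp [h']

-- the running-min fold computes THE least member (and dually for max)
theorem mins_char (xs : List Int) (m : Int) (hm : m ∈ xs) (hb : ∀ y ∈ xs, m ≤ y) :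
    xs.foldl mstep none = some m := by
  obtain ⟨a, t, rfl⟩ : ∃ a t, xs = a :: t := by
    cases xs with
    | nil => simp at hm
    | cons a t => exact ⟨a, t, rfl⟩
  rw [show ((a :: t).foldl mstep none) = t.foldl mstep (some a) from rfl, foldl_mstep_some]
  have hmem : t.foldl min a ∈ a :: t := foldl_min_mem t a
  have hlow := PySem.List.min?_isMin (xs := a :: t) (key := fun y => y)
    (m := t.foldl min a) (PySem.List.min?_id_cons ..) m hm
  exact congrArg some (le_antisymm hlow (hb _ hmem))

theorem maxs_char (xs : List Int) (m : Int) (hm : m ∈ xs) (hb : ∀ y ∈ xs, y ≤ m) :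
    xs.foldl Mstep none = some m := by
  obtain ⟨a, t, rfl⟩ : ∃ a t, xs = a :: t := by
    cases xs with
    | nil => simp at hm
    | cons a t => exact ⟨a, t, rfl⟩
  rw [show ((a :: t).foldl Mstep none) = t.foldl Mstep (some a) from rfl, foldl_Mstep_some]
  have hmem : t.foldl max a ∈ a :: t := foldl_max_mem t a
  have hhigh := PySem.List.max?_isMax (xs := a :: t) (key := fun y => y)
    (m := t.foldl max a) (PySem.List.max?_id_cons ..) m hm
  exact congrArg some (le_antisymm (hb _ hmem) hhigh)

-- in a strictly increasing list every member is ≤ the last element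
theorem le_getLast_of_pairwise : ∀ (l : List Int), l.Pairwise (· < ·) → ∀ (hne : l ≠ [])
    (x : Int), x ∈ l → x ≤ l.getLast hne := by
  intro l
  induction l with
  | nil => intro _ hne; exact absurd rfl hne
  | cons a t ih =>
    intro hl hne x hx
    cases t with
    | nil => simp_all
    | cons b u =>
      rcases List.mem_cons.mp hx with rfl | hx'
      · have hb : x < b := (List.pairwise_cons.mp hl).1 b (by simp)
        have := ih (List.pairwise_cons.mp hl).2 (by simp) b (by simp)
        rw [List.getLast_cons (by simp)]
        omega
      · have := ih (List.pairwise_cons.mp hl).2 (by simp) x hx'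
        rw [List.getLast_cons (by simp)]
        exact this

-- the central bridge: a membership-equal list vs a strictly increasing enumeration
theorem mins_eq_head? (l : List Int) (hl : l.Pairwise (· < ·)) (xs : List Int)
    (hm : ∀ x, x ∈ xs ↔ x ∈ l) : xs.foldl mstep none = l.head? := by
  cases l with
  | nil =>
    have : xs = [] := List.eq_nil_iff_forall_not_mem.mpr (fun x hx => by simp [hm x] at hx)
    rw [this]; rfl
  | cons a t =>
    have ha : a ∈ xs := (hm a).mpr (by simp)
    have hb : ∀ y ∈ xs, a ≤ y := by
      intro y hy
      rcases List.mem_cons.mp ((hm y).mp hy) with rfl | hy'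
      · exact le_refl _
      · exact le_of_lt ((List.pairwise_cons.mp hl).1 y hy')
    rw [mins_char xs a ha hb]; rfl

theorem maxs_eq_getLast? (l : List Int) (hl : l.Pairwise (· < ·)) (xs : List Int)
    (hm : ∀ x, x ∈ xs ↔ x ∈ l) : xs.foldl Mstep none = l.getLast? := by
  cases hl' : l with
  | nil =>
    have : xs = [] := List.eq_nil_iff_forall_not_mem.mpr
      (fun x hx => by simp [hm x, hl'] at hx)
    rw [this]; rfl
  | cons a t =>
    subst hl'
    have hne : (a :: t) ≠ [] := by simp
    have hL : (a :: t).getLast hne ∈ xs := (hm _).mpr (List.getLast_mem hne)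
    have hb : ∀ y ∈ xs, y ≤ (a :: t).getLast hne := by
      intro y hy
      exact le_getLast_of_pairwise _ hl hne y ((hm y).mp hy)
    rw [maxs_char xs _ hL hb, List.getLast?_eq_some_getLast]

-- labels-as-function = labels-as-list lookups, for the indices that actually occur
theorem hpLabel_eq (i : Int) (h0 : 0 ≤ i) (h6 : i ≤ 6) :
    hpLabel i = PySem.List.pyGetD hpLabels i "" := by
  interval_cases i <;> rfl

theorem lpLabel_eq (i : Int) (h0 : 0 ≤ i) (h6 : i ≤ 6) :
    lpLabel i = PySem.List.pyGetD lpLabels i "" := by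
  interval_cases i <;> rfl

-- the dict lookups characterized through the ordered key list
theorem hpIdx_char : ∀ (r : String) (p : Int × Int),
    hpIdx r = some p ↔ ∃ n : Nat, n < 6 ∧ r = hpOrder.getD n "" ∧ p = ((n : Int), (n : Int) + 1) := by
  intro r p
  constructor
  · intro h
    unfold hpIdx at h
    split at h <;> simp_all
    · exact ⟨0, by omega, rfl, h.symm⟩
    · exact ⟨1, by omega, rfl, h.symm⟩
    · exact ⟨2, by omega, rfl, h.symm⟩
    · exact ⟨3, by omega, rfl, h.symm⟩
    · exact ⟨4, by omega, rfl, h.symm⟩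
    · exact ⟨5, by omega, rfl, h.symm⟩
  · rintro ⟨n, hn, rfl, rfl⟩
    interval_cases n <;> rfl

theorem lpIdx_char : ∀ (r : String) (p : Int × Int),
    lpIdx r = some p ↔ ∃ n : Nat, n < 6 ∧ r = lpOrder.getD n "" ∧ p = ((n : Int), (n : Int) + 1) := by
  intro r p
  constructor
  · intro h
    unfold lpIdx at h
    split at h <;> simp_all
    · exact ⟨0, by omega, rfl, h.symm⟩
    · exact ⟨1, by omega, rfl, h.symm⟩
    · exact ⟨2, by omega, rfl, h.symm⟩
    · exact ⟨3, by omega, rfl, h.symm⟩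
    · exact ⟨4, by omega, rfl, h.symm⟩
    · exact ⟨5, by omega, rfl, h.symm⟩
  · rintro ⟨n, hn, rfl, rfl⟩
    interval_cases n <;> rfl

-- B's hit list: strictly increasing, with the expected membership
theorem hit_pairwise (order : List String) (regions : List String) :
    (((PySem.List.enumerate order).filter
        (fun p => PySem.Set.contains (PySem.Set.ofList regions) p.2)).map (·.1)).Pairwise
      (· < ·) := by
  refine List.pairwise_map.mpr ?_
  exact (PySem.List.pairwise_lt_enumerate ..).filter _

theorem hit_mem (order : List String) (hlen : order.length = 6) (regions : List String)
    (x : Int) :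
    x ∈ ((PySem.List.enumerate order).filter
      (fun p => PySem.Set.contains (PySem.Set.ofList regions) p.2)).map (·.1)
    ↔ ∃ n : Nat, n < 6 ∧ order.getD n "" ∈ regions ∧ x = (n : Int) := by
  simp only [List.mem_map, List.mem_filter, PySem.List.mem_enumerate_iff]
  constructor
  · rintro ⟨p, ⟨⟨k, hk, rfl⟩, hc⟩, rfl⟩
    refine ⟨k, by omega, ?_, by simp⟩
    have : order[k] ∈ regions := by
      have := (PySem.Set.contains_iff _ _).mp hc
      rwa [PySem.Set.mem_ofList] at this
    rwa [List.getD_eq_getElem order "" hk]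
  · rintro ⟨n, hn, hmem, rfl⟩
    have hn' : n < order.length := by omega
    refine ⟨((n : Int), order[n]), ⟨⟨n, hn', by simp⟩, ?_⟩, rfl⟩
    rw [PySem.Set.contains_iff, PySem.Set.mem_ofList]
    rwa [List.getD_eq_getElem order "" hn'] at hmem

-- membership in the first/second components of A's matched pairs
theorem mem_firsts (f : String → Option (Int × Int)) (order : List String)
    (hchar : ∀ (r : String) (p : Int × Int),
      f r = some p ↔ ∃ n : Nat, n < 6 ∧ r = order.getD n "" ∧ p = ((n : Int), (n : Int) + 1))
    (regions : List String) (x : Int) :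
    x ∈ regions.filterMap (fun r => (f r).map (·.1))
    ↔ ∃ n : Nat, n < 6 ∧ order.getD n "" ∈ regions ∧ x = (n : Int) := by
  simp only [List.mem_filterMap, Option.map_eq_some_iff]
  constructor
  · rintro ⟨r, hr, p, hp, rfl⟩
    obtain ⟨n, hn, rfl, rfl⟩ := (hchar r p).mp hp
    exact ⟨n, hn, hr, rfl⟩
  · rintro ⟨n, hn, hmem, rfl⟩
    exact ⟨order.getD n "", hmem, ((n : Int), (n : Int) + 1),
      (hchar _ _).mpr ⟨n, hn, rfl, rfl⟩, rfl⟩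

theorem mem_seconds (f : String → Option (Int × Int)) (order : List String)
    (hchar : ∀ (r : String) (p : Int × Int),
      f r = some p ↔ ∃ n : Nat, n < 6 ∧ r = order.getD n "" ∧ p = ((n : Int), (n : Int) + 1))
    (regions : List String) (x : Int) :
    x ∈ regions.filterMap (fun r => (f r).map (·.2))
    ↔ ∃ n : Nat, n < 6 ∧ order.getD n "" ∈ regions ∧ x = (n : Int) + 1 := by
  simp only [List.mem_filterMap, Option.map_eq_some_iff]
  constructor
  · rintro ⟨r, hr, p, hp, rfl⟩
    obtain ⟨n, hn, rfl, rfl⟩ := (hchar r p).mp hp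
    exact ⟨n, hn, hr, rfl⟩
  · rintro ⟨n, hn, hmem, rfl⟩
    exact ⟨order.getD n "", hmem, ((n : Int), (n : Int) + 1),
      (hchar _ _).mpr ⟨n, hn, rfl, rfl⟩, rfl⟩

-- the endgame over an abstract strictly bounded hit list
theorem endgame (g : Int → String) (labels : List String)
    (hlab : ∀ i : Int, 0 ≤ i → i ≤ 6 → g i = PySem.List.pyGetD labels i "")
    (hit : List Int) (hbound : ∀ x ∈ hit, 0 ≤ x ∧ x < 6) :
    (match (hit.head?, (hit.map (· + 1)).getLast?) with
     | (some l, some h) => [g l, g h]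
     | _ => [])
    = (if hit.isEmpty then []
       else [PySem.List.pyGetD labels (PySem.List.pyGetD hit 0 0) "",
             PySem.List.pyGetD labels (PySem.List.pyGetD hit (-1) 0 + 1) ""]) := by
  cases hit with
  | nil => rfl
  | cons h0 t =>
    have hne : h0 :: t ≠ [] := by simp
    have hlast : ((h0 :: t).map (· + 1)).getLast? = some ((h0 :: t).getLast hne + 1) := by
      rw [List.getLast?_map, List.getLast?_eq_some_getLast (h := hne)]; rfl
    rw [hlast]
    show [g h0, g ((h0 :: t).getLast hne + 1)] = _
    have hb0 := hbound h0 (by simp)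
    have hbL := hbound _ (List.getLast_mem hne)
    rw [hlab _ hb0.1 (by omega), hlab _ (by omega) (by omega)]
    have hget0 : PySem.List.pyGetD (h0 :: t) 0 0 = h0 := PySem.List.pyGetD_zero_cons ..
    have hgetL : PySem.List.pyGetD (h0 :: t) (-1) 0 = (h0 :: t).getLast hne :=
      PySem.List.pyGetD_neg_one (h0 :: t) 0 hne
    simp [hget0, hgetL]

-- one side, both bodies, in full
theorem main_side (f : String → Option (Int × Int)) (g : Int → String)
    (order labels : List String) (hlen : order.length = 6)
    (hchar : ∀ (r : String) (p : Int × Int),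
      f r = some p ↔ ∃ n : Nat, n < 6 ∧ r = order.getD n "" ∧ p = ((n : Int), (n : Int) + 1))
    (hlab : ∀ i : Int, 0 ≤ i → i ≤ 6 → g i = PySem.List.pyGetD labels i "")
    (regions : List String) :
    (let s : PySem.Set Int := regions.foldl (stepA f) PySem.Set.empty
     if s.isEmpty then []
     else [g ((PySem.List.min? s (fun x => x)).getD 0), g ((PySem.List.max? s (fun x => x)).getD 0)])
    = (if (((PySem.List.enumerate order).filter
            (fun p => PySem.Set.contains (PySem.Set.ofList regions) p.2)).map (·.1)).isEmpty
       then []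
       else [PySem.List.pyGetD labels
               (PySem.List.pyGetD (((PySem.List.enumerate order).filter
                 (fun p => PySem.Set.contains (PySem.Set.ofList regions) p.2)).map (·.1)) 0 0) "",
             PySem.List.pyGetD labels
               (PySem.List.pyGetD (((PySem.List.enumerate order).filter
                 (fun p => PySem.Set.contains (PySem.Set.ofList regions) p.2)).map (·.1)) (-1) 0
                + 1) ""]) := by
  have hpair : ∀ r i j, f r = some (i, j) → j = i + 1 := by
    intro r i j h
    obtain ⟨n, _, _, hp⟩ := (hchar r (i, j)).mp h
    simp at hp
    omega
  have hmin : (regions.filterMap (fun r => (f r).map (·.1))).foldl mstep none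
      = (((PySem.List.enumerate order).filter
          (fun p => PySem.Set.contains (PySem.Set.ofList regions) p.2)).map (·.1)).head? :=
    mins_eq_head? _ (hit_pairwise order regions) _
      (fun x => (mem_firsts f order hchar regions x).trans (hit_mem order hlen regions x).symm)
  have hmax : (regions.filterMap (fun r => (f r).map (·.2))).foldl Mstep none
      = ((((PySem.List.enumerate order).filter
          (fun p => PySem.Set.contains (PySem.Set.ofList regions) p.2)).map (·.1)).map
            (· + 1)).getLast? := by
    refine maxs_eq_getLast? _ ?_ _ (fun x => ?_)
    · exact List.pairwise_map.mpr ((hit_pairwise order regions).imp (by omega))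
    · rw [mem_seconds f order hchar regions x]
      simp only [List.mem_map, hit_mem order hlen regions]
      constructor
      · rintro ⟨n, hn, hmem, rfl⟩
        exact ⟨(n : Int), ⟨n, hn, hmem, rfl⟩, rfl⟩
      · rintro ⟨y, ⟨n, hn, hmem, rfl⟩, rfl⟩
        exact ⟨n, hn, hmem, rfl⟩
  have hbound : ∀ x ∈ (((PySem.List.enumerate order).filter
      (fun p => PySem.Set.contains (PySem.Set.ofList regions) p.2)).map (·.1)),
      0 ≤ x ∧ x < 6 := by
    intro x hx
    rw [hit_mem order hlen regions] at hx
    obtain ⟨n, hn, _, rfl⟩ := hx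
    constructor <;> [positivity; exact_mod_cast hn]
  rw [coreA f g hpair regions, LH_split f regions (none, none), hmin, hmax]
  exact endgame g labels hlab _ hbound

-- ===== VERDICT (by name: the statement is the Claim_ definition above) =====
theorem extent_from_regions_py_spec : Claim_equal_extent_from_regions_py := by
  intro regions side _
  show extent_from_regions_py regions side = extent_from_regions_py_alt regions side
  unfold extent_from_regions_py extent_from_regions_py_alt
  by_cases h : side == "hp"
  · simp only [h, if_pos]
    exact main_side hpIdx hpLabel hpOrder hpLabels rfl hpIdx_char hpLabel_eq regions
  · simp only [h, Bool.false_eq_true, if_neg, not_false_iff]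
    exact main_side lpIdx lpLabel lpOrder lpLabels rfl lpIdx_char lpLabel_eq regions
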